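-- pv_equiv track=rewrite | github.com/k-tsky/DigiCod | Block-Faltungs_codes.py | build_H_matrix
-- ===== SOURCE A (Python) =====
-- def poly_div(dividend, divisor):
--     remainder = dividend[:]
--     while len(remainder) >= len(divisor):
--         if remainder[0] == 1:
--             for i in range(len(divisor)):
--                 if i < len(remainder):
--                     remainder[i] ^= divisor[i]
--         remainder.pop(0)
--     return remainder
--
-- def syndrome(generator, pos, n):
--     # Erzeuge Fehlervektor mit einem 1-bit an der gegebenen Position
--     error = [0] * n
--     error[pos] = 1
--
--     # Division des Fehlerpolynoms durch Generator
--     remainder = poly_div(error[:], generator)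
--
--     # Padding: Stelle sicher, dass das Syndrom die richtige Länge hat
--     while len(remainder) < len(generator) - 1:
--         remainder.insert(0, 0)
--
--     return remainder
--
-- def build_H_matrix(generator, n):
--     syndromes = []
--     for i in range(n):
--         syndromes.append(syndrome(generator, i, n))
--     H = []
--     for col in zip(*syndromes):
--         H.append(list(col))
--     return H, syndromes
-- ===== SOURCE B (Python) =====
-- def build_H_matrix(generator, n):
--     # Incremental: syndrome for position pos is x^(n-1-pos) mod g; compute each
--     # from the previous by shift-append + one conditional reduce, one pass.
--     m = len(generator)
--     r = [0] * (m - 2) + [1] if m >= 2 else []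
--     syndromes = []
--     for L in range(1, n + 1):
--         if L > 1:
--             r = r + [0]
--             if r[0] == 1:
--                 r = [a ^ b for a, b in zip(r, generator)]
--             r = r[1:]
--         syndromes.insert(0, r)
--     H = []
--     if syndromes:
--         for j in range(len(syndromes[0])):
--             H.append([s[j] for s in syndromes])
--     return H, syndromes
-- ===== Notes on version B (the rewrite author's own statement) =====
-- stated objective: faster
-- what changed: A recomputes each syndrome from scratch by dividing a fresh unit error vector by the generator (a full O(n)-step division per position); B computes all n syndromes in one pass, deriving each syndrome from the previous one by a single shift-append-and-conditional-reduce step, then transposes once.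
import Mathlib
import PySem

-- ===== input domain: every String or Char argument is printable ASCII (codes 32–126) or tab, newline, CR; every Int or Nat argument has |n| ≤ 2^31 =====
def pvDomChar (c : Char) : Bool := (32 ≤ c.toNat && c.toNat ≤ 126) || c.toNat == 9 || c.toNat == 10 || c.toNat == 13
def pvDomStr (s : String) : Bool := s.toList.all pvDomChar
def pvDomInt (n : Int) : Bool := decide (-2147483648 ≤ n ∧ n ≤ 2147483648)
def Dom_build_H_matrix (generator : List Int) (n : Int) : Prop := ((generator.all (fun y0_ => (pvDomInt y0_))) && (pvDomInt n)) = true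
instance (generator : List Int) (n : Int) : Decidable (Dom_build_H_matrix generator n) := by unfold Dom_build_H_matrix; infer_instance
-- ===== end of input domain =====

-- B replaces A's per-position full polynomial division (O(n^2*m)) by one pass that derives each
-- syndrome from the previous one via a single shift-and-reduce step (O(n*m)); measured faster.

-- ===== PORT A =====
-- `for i in range(len(divisor)): if i < len(remainder): remainder[i] ^= divisor[i]`:
-- xor divisor into the first min(len) entries of remainder, keeping remainder's tail (exact).
def pvXorPrefix : List Int → List Int → List Int
  | r, [] => r
  | [], _ :: _ => []
  | a :: r, d :: ds => PySem.Int.bxor a d :: pvXorPrefix r ds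

-- used by pvPolyDivGo's decreasing_by
theorem pvXorPrefix_length (r d : List Int) : (pvXorPrefix r d).length = r.length := by
  induction r generalizing d with
  | nil => cases d <;> rfl
  | cons a r ih => cases d <;> simp [pvXorPrefix, ih]

-- the `while len(remainder) >= len(divisor):` loop of poly_div; on divisor = [] with remainder = []
-- Python raises IndexError at `remainder[0]` (excluded by Pre_), here the guard exits.
def pvPolyDivGo (divisor : List Int) : List Int → List Int
  | [] => []
  | a :: rest =>
    if divisor.length ≤ rest.length + 1 then
      pvPolyDivGo divisor (if a = 1 then (pvXorPrefix (a :: rest) divisor).tail else rest)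
    else a :: rest
termination_by r => r.length
decreasing_by
  split <;> simp [List.length_tail, pvXorPrefix_length]

def poly_div (dividend divisor : List Int) : List Int := pvPolyDivGo divisor dividend

-- `while len(remainder) < len(generator) - 1: remainder.insert(0, 0)`
def pvPadTo (k : Nat) (r : List Int) : List Int :=
  if r.length < k then pvPadTo k (0 :: r) else r
termination_by k - r.length

def syndrome (generator : List Int) (pos n : Int) : List Int :=
  let error := PySem.List.pySetD (List.replicate n.toNat (0 : Int)) pos 1
  pvPadTo (generator.length - 1) (poly_div error generator)

-- `zip(*syndromes)` materialised as a list of columns (truncates at the first exhausted row)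
def pvZipStar : List (List Int) → List (List Int)
  | [] => []
  | r :: rest =>
    if (r :: rest).all (fun s => !s.isEmpty) then
      ((r :: rest).map (fun s => s.headD 0)) :: pvZipStar ((r :: rest).map List.tail)
    else []
termination_by rows => (rows.headD []).length
decreasing_by
  rename_i h
  simp only [List.all_cons, Bool.and_eq_true] at h
  cases r with
  | nil => simp at h
  | cons x xs => simp

def build_H_matrix (generator : List Int) (n : Int) : List (List Int) × List (List Int) :=
  let syndromes := (PySem.List.pyRange 0 n 1).map (fun i => syndrome generator i n)
  (pvZipStar syndromes, syndromes)

-- ===== PORT B =====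
-- one shift-and-reduce step: r = r + [0]; if r[0] == 1: r = [a ^ b for a, b in zip(r, generator)]; r = r[1:]
def pvStepB (generator r0 : List Int) : List Int :=
  let r := r0 ++ [0]
  let r := if r.headD 0 = 1 then List.zipWith PySem.Int.bxor r generator else r
  r.tail

def build_H_matrix_alt (generator : List Int) (n : Int) : List (List Int) × List (List Int) :=
  let m := generator.length
  let r0 : List Int := if 2 ≤ m then List.replicate (m - 2) 0 ++ [1] else []
  let st := (PySem.List.pyRange 1 (n + 1) 1).foldl
      (fun st L =>
        let r := if 1 < L then pvStepB generator st.1 else st.1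
        (r, r :: st.2))
      (r0, ([] : List (List Int)))
  let syndromes := st.2
  let H := match syndromes with
    | [] => []
    | s0 :: _ =>
      (PySem.List.pyRange 0 (s0.length : Int) 1).map
        (fun j => syndromes.map (fun s => PySem.List.pyGetD s j 0))
  (H, syndromes)

-- ===== PRECONDITION & SPEC =====
-- Pre_ excludes only generator = [] with n ≥ 1, where A's poly_div pops the remainder empty and
-- then raises IndexError at `remainder[0]`.
def Pre_build_H_matrix (generator : List Int) (n : Int) : Prop := generator ≠ [] ∨ n ≤ 0
instance (generator : List Int) (n : Int) : Decidable (Pre_build_H_matrix generator n) := by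
  unfold Pre_build_H_matrix; infer_instance

def pvWitness_build_H_matrix : List Int × Int := ([1, 0, 1], 5)

def Spec_build_H_matrix (generator : List Int) (n : Int) (out : List (List Int) × List (List Int)) : Prop := out = build_H_matrix_alt generator n
instance (generator : List Int) (n : Int) (out : List (List Int) × List (List Int)) : Decidable (Spec_build_H_matrix generator n out) := by unfold Spec_build_H_matrix; infer_instance

-- ===== CLAIM (what is proved, stated in full; the proofs are below) =====
def Claim_equal_build_H_matrix : Prop := ∀ (generator : List Int) (n : Int), Dom_build_H_matrix generator n → Pre_build_H_matrix generator n → Spec_build_H_matrix generator n (build_H_matrix generator n)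

-- ===== LEMMAS AND PROOFS =====

-- A-side division result, padded: the value A stores as one syndrome
def pvRed (g v : List Int) : List Int := pvPadTo (g.length - 1) (pvPolyDivGo g v)

-- one step of A's while loop lifted to a shifted remainder (proof-side only)
def pvStep1 (g w : List Int) : List Int :=
  if (w ++ [0]).headD 0 = 1 then (pvXorPrefix (w ++ [0]) g).tail else (w ++ [0]).tail

theorem pvPadTo_eq (k : Nat) (v : List Int) :
    pvPadTo k v = List.replicate (k - v.length) 0 ++ v := by
  fun_induction pvPadTo k v with
  | case1 v h ih =>
    rw [ih]
    have h2 : k - v.length = (k - (0 :: v).length) + 1 := by simp at *; omega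
    rw [h2, List.replicate_succ']
    simp
  | case2 v h => simp at h ⊢; omega

theorem pvPolyDivGo_short (g v : List Int) (h : v.length < g.length) :
    pvPolyDivGo g v = v := by
  cases v with
  | nil => rw [pvPolyDivGo]
  | cons a rest =>
    rw [pvPolyDivGo]
    simp at h
    rw [if_neg (by omega)]

theorem pvPolyDivGo_length (g v : List Int) (hg : g ≠ []) :
    (pvPolyDivGo g v).length = if g.length ≤ v.length then g.length - 1 else v.length := by
  have hm : 1 ≤ g.length := List.length_pos_of_ne_nil hg
  fun_induction pvPolyDivGo g v with
  | case1 => simp only [List.length_nil]; split <;> omega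
  | case2 a rest h ih =>
    have hx : (if a = 1 then (pvXorPrefix (a :: rest) g).tail else rest).length = rest.length := by
      split <;> simp [List.length_tail, pvXorPrefix_length]
    simp only [dite_eq_ite] at ih
    rw [ih, hx]
    simp only [List.length_cons]
    by_cases hc : g.length ≤ rest.length
    · rw [if_pos hc, if_pos (by omega)]
    · rw [if_neg hc, if_pos (by omega)]
      omega
  | case3 a rest h =>
    simp only [List.length_cons]
    rw [if_neg (by omega)]

theorem pvRed_cons_zero (g v : List Int) (hg : g ≠ []) :
    pvRed g (0 :: v) = pvRed g v := by
  have hm : 1 ≤ g.length := List.length_pos_of_ne_nil hg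
  unfold pvRed
  rw [pvPolyDivGo]
  by_cases hc : g.length ≤ v.length + 1
  · rw [if_pos hc, if_neg (by norm_num)]
  · rw [if_neg hc, pvPolyDivGo_short g v (by omega)]
    conv_rhs => rw [pvPadTo]
    rw [if_pos (by omega)]

theorem pvXorPrefix_append (g x y : List Int) (h : g.length ≤ x.length) :
    pvXorPrefix (x ++ y) g = pvXorPrefix x g ++ y := by
  induction x generalizing g with
  | nil =>
    cases g with
    | nil => simp [pvXorPrefix]
    | cons d ds => simp at h
  | cons a r ih =>
    cases g with
    | nil => simp [pvXorPrefix]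
    | cons d ds =>
      simp at h
      simp [pvXorPrefix, ih ds (by omega)]

theorem pvXorPrefix_eq_zipWith (g x : List Int) (h : x.length ≤ g.length) :
    pvXorPrefix x g = List.zipWith PySem.Int.bxor x g := by
  induction x generalizing g with
  | nil => cases g <;> rfl
  | cons a r ih =>
    cases g with
    | nil => simp at h
    | cons d ds =>
      simp at h
      simp [pvXorPrefix, ih ds (by omega)]

-- KEY: appending one zero to the dividend performs at most one more division step
theorem pvPolyDivGo_append_zero (g : List Int) (hg : g ≠ []) (v : List Int) :
    pvPolyDivGo g (v ++ [0]) =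
      if g.length ≤ (pvPolyDivGo g v).length + 1 then pvStep1 g (pvPolyDivGo g v)
      else pvPolyDivGo g v ++ [0] := by
  have hm : 1 ≤ g.length := List.length_pos_of_ne_nil hg
  suffices H : ∀ (N : Nat) (v : List Int), v.length ≤ N →
      pvPolyDivGo g (v ++ [0]) =
        if g.length ≤ (pvPolyDivGo g v).length + 1 then pvStep1 g (pvPolyDivGo g v)
        else pvPolyDivGo g v ++ [0] by
    exact H v.length v le_rfl
  have base : pvPolyDivGo g ([] ++ [0]) =
      if g.length ≤ (pvPolyDivGo g ([] : List Int)).length + 1 then pvStep1 g (pvPolyDivGo g ([] : List Int))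
      else pvPolyDivGo g ([] : List Int) ++ [0] := by
    rw [show (([] : List Int) ++ [0]) = [(0 : Int)] from rfl, pvPolyDivGo, pvPolyDivGo]
    by_cases h1 : g.length ≤ 1
    · rw [if_pos (by simpa using h1), if_neg (by norm_num), if_pos (by simpa using h1), pvPolyDivGo]
      simp [pvStep1]
    · rw [if_neg (by simpa using h1), if_neg (by simpa using h1)]
      simp
  intro N
  induction N with
  | zero =>
    intro v hv
    have hnil : v = [] := List.length_eq_zero_iff.mp (by omega)
    rw [hnil]
    exact base
  | succ N ih =>
    intro v hv
    cases v with
    | nil => exact base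
    | cons a rest =>
      by_cases hc : g.length ≤ rest.length + 1
      · -- the while loop runs on a :: rest
        have hstep : pvPolyDivGo g (a :: rest)
            = pvPolyDivGo g (if a = 1 then (pvXorPrefix (a :: rest) g).tail else rest) := by
          rw [pvPolyDivGo, if_pos hc]
        have harg : (if a = 1 then (pvXorPrefix (a :: (rest ++ [0])) g).tail else rest ++ [0])
            = (if a = 1 then (pvXorPrefix (a :: rest) g).tail else rest) ++ [0] := by
          split
          · rw [show (a :: (rest ++ [0])) = ((a :: rest) ++ [0]) from rfl,
              pvXorPrefix_append g (a :: rest) [0] (by simpa using hc)]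
            cases g with
            | nil => exact absurd rfl hg
            | cons d ds => simp [pvXorPrefix]
          · rfl
        have hlen : (if a = 1 then (pvXorPrefix (a :: rest) g).tail else rest).length ≤ N := by
          have hv' : rest.length ≤ N := by simpa using hv
          split <;> simp [List.length_tail, pvXorPrefix_length] <;> omega
        simp only [List.cons_append]
        rw [pvPolyDivGo, if_pos (by simp; omega), harg, ih _ hlen, ← hstep]
      · -- the while loop does not run on a :: rest
        have hv1 : pvPolyDivGo g (a :: rest) = a :: rest :=
          pvPolyDivGo_short g (a :: rest) (by simp; omega)
        rw [hv1]
        simp only [List.cons_append]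
        rw [pvPolyDivGo]
        by_cases hc2 : g.length ≤ rest.length + 2
        · have hL : g.length ≤ (rest ++ [0]).length + 1 := by simp; omega
          have hR : g.length ≤ (a :: rest).length + 1 := by simp; omega
          rw [if_pos hL, if_pos hR]
          unfold pvStep1
          simp only [List.cons_append, List.headD_cons, List.tail_cons]
          by_cases ha : a = 1
          · rw [if_pos ha, pvPolyDivGo_short g _ (by simp [List.length_tail, pvXorPrefix_length]; omega)]
          · rw [if_neg ha, pvPolyDivGo_short g _ (by simp; omega)]
        · have hL : ¬ g.length ≤ (rest ++ [0]).length + 1 := by simp; omega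
          have hR : ¬ g.length ≤ (a :: rest).length + 1 := by simp; omega
          rw [if_neg hL, if_neg hR]

theorem pvRed_unit_succ (g : List Int) (hg : g ≠ []) (t : Nat) :
    pvRed g (1 :: List.replicate (t + 1) 0) = pvStepB g (pvRed g (1 :: List.replicate t 0)) := by
  have hm : 1 ≤ g.length := List.length_pos_of_ne_nil hg
  have hsplit : (1 : Int) :: List.replicate (t + 1) 0 = (1 :: List.replicate t 0) ++ [0] := by
    rw [List.replicate_succ']
    rfl
  set v : List Int := 1 :: List.replicate t 0 with hv
  have hvlen : v.length = t + 1 := by simp [hv]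
  set w : List Int := pvPolyDivGo g v with hw
  have hwl : w.length = if g.length ≤ t + 1 then g.length - 1 else t + 1 := by
    rw [hw, pvPolyDivGo_length g v hg, hvlen]
  unfold pvRed
  rw [hsplit, pvPolyDivGo_append_zero g hg v, ← hw]
  by_cases hcase : g.length ≤ w.length + 1
  · -- the new step reduces: the remainder already has full length g.length - 1
    have hwm : w.length = g.length - 1 := by split at hwl <;> omega
    have hs1 : (pvStep1 g w).length = g.length - 1 := by
      unfold pvStep1
      split <;> simp [List.length_tail, pvXorPrefix_length, hwm]
    have hsb : pvStepB g w = pvStep1 g w := by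
      unfold pvStepB pvStep1
      rw [apply_ite List.tail, pvXorPrefix_eq_zipWith g (w ++ [0]) (by simp [hwm]; omega)]
    rw [if_pos hcase, pvPadTo_eq, pvPadTo_eq, hs1, hwm]
    simp [hsb]
  · -- still in the padding regime: the shift only moves the 1 one slot to the right
    have hreg : w.length = t + 1 ∧ t + 2 < g.length := by split at hwl <;> omega
    have hwv : w = v := by rw [hw]; exact pvPolyDivGo_short g v (by rw [hvlen]; omega)
    obtain ⟨k, hk⟩ : ∃ k, g.length - 1 - (t + 1) = k + 1 := ⟨g.length - t - 3, by omega⟩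
    rw [if_neg hcase, pvPadTo_eq, pvPadTo_eq, hwv, hvlen]
    have h2 : v.length + 1 = t + 2 := by omega
    rw [List.length_append, hvlen, List.length_singleton, hk, List.replicate_succ]
    unfold pvStepB
    have hhead : ((0 : Int) :: (List.replicate k 0 ++ v) ++ [0]).headD 0 = 0 := by simp
    simp only [List.cons_append, List.headD_cons]
    rw [if_neg (by norm_num), List.tail_cons]
    have : g.length - 1 - (t + 1 + 1) = k := by omega
    rw [this]
    simp

theorem pvRed_unit_zero (g : List Int) (hg : g ≠ []) :
    pvRed g [1] = (if 2 ≤ g.length then List.replicate (g.length - 2) 0 ++ [1] else []) := by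
  have hm : 1 ≤ g.length := List.length_pos_of_ne_nil hg
  unfold pvRed
  by_cases h2 : 2 ≤ g.length
  · rw [pvPolyDivGo_short g [1] (by simp; omega), pvPadTo_eq, if_pos h2]
    have he : g.length - 1 - [(1 : Int)].length = g.length - 2 := by simp; omega
    rw [he]
  · have h1 : g.length = 1 := by omega
    rw [if_neg h2]
    cases g with
    | nil => exact absurd rfl hg
    | cons d ds =>
      have hds : ds = [] := by simp at h1; exact h1
      subst hds
      rw [pvPolyDivGo, if_pos (by simp), if_pos rfl]
      simp only [pvXorPrefix, List.tail_cons]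
      rw [pvPolyDivGo, pvPadTo_eq]
      simp

theorem pvRed_iterate (g : List Int) (hg : g ≠ []) (k : Nat) :
    (pvStepB g)^[k] (if 2 ≤ g.length then List.replicate (g.length - 2) 0 ++ [1] else [])
      = pvRed g (1 :: List.replicate k 0) := by
  induction k with
  | zero => simp [Function.iterate_zero, (pvRed_unit_zero g hg).symm]
  | succ k ih => rw [Function.iterate_succ_apply', ih, ← pvRed_unit_succ g hg k]

theorem pvRed_drop_zeros (g : List Int) (hg : g ≠ []) (p t : Nat) :
    pvRed g (List.replicate p 0 ++ 1 :: List.replicate t 0) = pvRed g (1 :: List.replicate t 0) := by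
  induction p with
  | zero => rw [List.replicate_zero, List.nil_append]
  | succ p ih => rw [List.replicate_succ, List.cons_append, pvRed_cons_zero g _ hg, ih]

theorem pvRed_unit_length (g : List Int) (hg : g ≠ []) (t : Nat) :
    (pvRed g (1 :: List.replicate t 0)).length = g.length - 1 := by
  have hm : 1 ≤ g.length := List.length_pos_of_ne_nil hg
  unfold pvRed
  rw [pvPadTo_eq]
  simp only [List.length_append, List.length_replicate]
  rw [pvPolyDivGo_length g _ hg]
  simp only [List.length_cons, List.length_replicate]
  split <;> omega

-- a reversed index loop, elementwise
theorem pv_reverse_range_map (f : Nat → List Int) (N : Nat) :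
    (List.range N).reverse.map f = (List.range N).map (fun k => f (N - 1 - k)) := by
  induction N with
  | zero => rfl
  | succ N ih =>
    have hL : (List.range (N + 1)).reverse.map f = f N :: (List.range N).reverse.map f := by
      rw [List.range_succ]
      simp
    have hR : (List.range (N + 1)).map (fun k => f (N + 1 - 1 - k))
        = f N :: (List.range N).map (fun k => f (N - 1 - k)) := by
      rw [List.range_succ_eq_map, List.map_cons, List.map_map]
      refine congrArg₂ _ (by norm_num)
        (List.map_congr_left fun k _ => by simp only [Function.comp_apply]; congr 1; omega)
    rw [hL, hR, ih]

-- peeling the newest element off a reversed range of indices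
theorem pv_reverse_range_succ_map (f : Nat → List Int) (k : Nat) :
    (List.range (k + 1)).reverse.map f = (List.range k).reverse.map (fun j => f (j + 1)) ++ [f 0] := by
  rw [List.range_succ_eq_map]
  simp [List.map_map, Function.comp_def]

-- B's fold over range(a, a+k) with a ≥ 2 iterates pvStepB and prepends each new value
theorem pvFoldB (g : List Int) (a : Int) (ha : 2 ≤ a) (k : Nat) (r : List Int) (S : List (List Int)) :
    (PySem.List.pyRange a (a + k) 1).foldl
        (fun st L =>
          (if 1 < L then pvStepB g st.1 else st.1,
           (if 1 < L then pvStepB g st.1 else st.1) :: st.2)) (r, S)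
      = ((pvStepB g)^[k] r,
         (List.range k).reverse.map (fun j => (pvStepB g)^[j + 1] r) ++ S) := by
  induction k generalizing a r S with
  | zero =>
    rw [show a + ((0 : Nat) : Int) = a by simp, PySem.List.pyRange_one_eq_nil le_rfl]
    simp
  | succ k ih =>
    rw [PySem.List.pyRange_one_cons (by push_cast; omega), List.foldl_cons]
    simp only [if_pos (by omega : (1 : Int) < a)]
    rw [show a + ((k + 1 : Nat) : Int) = (a + 1) + (k : Int) by push_cast; ring,
      ih (a + 1) (by omega) (pvStepB g r) (pvStepB g r :: S)]
    refine congrArg₂ _ (by rw [← Function.iterate_succ_apply]) ?_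
    rw [pv_reverse_range_succ_map (fun j => (pvStepB g)^[j + 1] r) k]
    simp only [List.append_assoc, List.singleton_append]
    refine congrArg₂ _ (List.map_congr_left fun j _ => ?_) rfl
    rw [← Function.iterate_succ_apply]

-- transpose: pvZipStar on rows of uniform length w equals the index-loop transpose
theorem pvZipStar_uniform (w : Nat) (S : List (List Int)) (hne : S ≠ [])
    (hw : ∀ s ∈ S, s.length = w) :
    pvZipStar S = (PySem.List.pyRange 0 (w : Int) 1).map
        (fun j => S.map (fun s => PySem.List.pyGetD s j 0)) := by
  induction w generalizing S with
  | zero =>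
    cases S with
    | nil => exact absurd rfl hne
    | cons s rest =>
      have hs : s = [] := List.length_eq_zero_iff.mp (hw s (by simp))
      rw [pvZipStar, if_neg (by simp [hs]), show ((0 : Nat) : Int) = 0 from rfl,
        PySem.List.pyRange_one_eq_nil le_rfl, List.map_nil]
  | succ w ih =>
    cases S with
    | nil => exact absurd rfl hne
    | cons s rest =>
      have hall : ∀ u ∈ s :: rest, u ≠ [] := by
        intro u hu
        have := hw u hu
        intro hnil
        rw [hnil] at this
        simp at this
      have hcond : ((s :: rest).all fun u => !u.isEmpty) = true := by
        simp only [List.all_eq_true]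
        intro u hu
        simpa [List.isEmpty_eq_false_iff] using hall u hu
      rw [pvZipStar, if_pos hcond]
      have htl : ∀ u ∈ (s :: rest).map List.tail, u.length = w := by
        intro u hu
        rw [List.mem_map] at hu
        obtain ⟨x, hx, rfl⟩ := hu
        rw [List.length_tail, hw x hx]
        omega
      rw [ih ((s :: rest).map List.tail) (by simp) htl]
      have hRHS : PySem.List.pyRange 0 ((w + 1 : Nat) : Int) 1
          = 0 :: (PySem.List.pyRange 0 ((w : Nat) : Int) 1).map (fun j => j + 1) := by
        rw [PySem.List.pyRange_one, PySem.List.pyRange_one]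
        simp only [sub_zero, Int.toNat_natCast, List.range_succ_eq_map, List.map_cons, List.map_map]
        refine congrArg₂ _ (by norm_num)
          (List.map_congr_left fun k _ => by simp only [Function.comp_apply]; push_cast; ring)
      conv_rhs => rw [hRHS, List.map_cons, List.map_map]
      refine congrArg₂ _ ?_ (List.map_congr_left fun j hj => ?_)
      · refine List.map_congr_left fun u hu => ?_
        cases u with
        | nil => exact absurd rfl (hall [] hu)
        | cons x xs => simp [PySem.List.pyGetD]
      · simp only [Function.comp_apply, List.map_map]
        refine List.map_congr_left fun u hu => ?_
        simp only [Function.comp_apply]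
        have hj0 : 0 ≤ j := (PySem.List.mem_pyRange_one.mp hj).1
        cases u with
        | nil => exact absurd rfl (hall [] hu)
        | cons x xs =>
          obtain ⟨jn, rfl⟩ : ∃ jn : Nat, j = (jn : Int) := ⟨j.toNat, by omega⟩
          rw [show ((jn : Int) + 1) = ((jn + 1 : Nat) : Int) by push_cast; ring,
            PySem.List.pyGetD_natCast, PySem.List.pyGetD_natCast]
          simp

-- A's syndrome at position k (of n = N) is the (N-1-k)-th iterate of B's shift-and-reduce step
theorem pv_syndrome_eq (g : List Int) (hg : g ≠ []) (N k : Nat) (hk : k < N) :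
    syndrome g (k : Int) (N : Int)
      = (pvStepB g)^[N - 1 - k]
          (if 2 ≤ g.length then List.replicate (g.length - 2) (0 : Int) ++ [1] else []) := by
  unfold syndrome poly_div
  have herr : PySem.List.pySetD (List.replicate ((N : Int)).toNat (0 : Int)) (k : Int) 1
      = List.replicate k 0 ++ 1 :: List.replicate (N - 1 - k) 0 := by
    rw [Int.toNat_natCast, PySem.List.pySetD_natCast, List.set_eq_take_append_cons_drop,
      if_pos (by simpa using hk), List.take_replicate, List.drop_replicate]
    congr 1
    · congr 1; omega
    · congr 2; omega
  rw [herr]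
  have := pvRed_drop_zeros g hg k (N - 1 - k)
  unfold pvRed at this
  rw [this]
  have h2 := pvRed_iterate g hg (N - 1 - k)
  unfold pvRed at h2
  rw [h2]

-- every syndrome has length (len generator) - 1
theorem pv_iter_length (g : List Int) (hg : g ≠ []) (k : Nat) :
    ((pvStepB g)^[k]
        (if 2 ≤ g.length then List.replicate (g.length - 2) (0 : Int) ++ [1] else [])).length
      = g.length - 1 := by
  rw [pvRed_iterate g hg k]
  exact pvRed_unit_length g hg k

-- ===== VERDICT (by name: the statement is the Claim_ definition above) =====
theorem build_H_matrix_spec : Claim_equal_build_H_matrix := by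
  intro g n _ hpre
  simp only [Spec_build_H_matrix, build_H_matrix, build_H_matrix_alt]
  by_cases hn : n ≤ 0
  · rw [PySem.List.pyRange_one_eq_nil hn, PySem.List.pyRange_one_eq_nil (by omega)]
    simp only [List.map_nil, List.foldl_nil]
    rw [pvZipStar]
  · have hg : g ≠ [] := by
      rcases hpre with h | h
      · exact h
      · omega
    have hm : 1 ≤ g.length := List.length_pos_of_ne_nil hg
    obtain ⟨N, rfl, hN⟩ : ∃ N : Nat, n = (N : Int) ∧ 1 ≤ N := ⟨n.toNat, by omega, by omega⟩
    set r0 : List Int :=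
      if 2 ≤ g.length then List.replicate (g.length - 2) (0 : Int) ++ [1] else [] with hr0
    -- both programs produce the same list of syndromes
    have hsyn : (PySem.List.pyRange 0 (N : Int) 1).map (fun i => syndrome g i (N : Int))
        = (List.range N).reverse.map (fun k => (pvStepB g)^[k] r0) := by
      rw [PySem.List.pyRange_one, List.map_map, pv_reverse_range_map]
      rw [show ((N : Int) - 0).toNat = N by omega]
      refine List.map_congr_left fun k hk => ?_
      have hkN : k < N := List.mem_range.mp hk
      simp only [Function.comp_apply, zero_add]
      exact pv_syndrome_eq g hg N k hkN
    have hfold : (PySem.List.pyRange 1 ((N : Int) + 1) 1).foldl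
          (fun st L =>
            (if 1 < L then pvStepB g st.1 else st.1,
             (if 1 < L then pvStepB g st.1 else st.1) :: st.2))
          (r0, ([] : List (List Int)))
        = ((pvStepB g)^[N - 1] r0, (List.range N).reverse.map (fun k => (pvStepB g)^[k] r0)) := by
      rw [PySem.List.pyRange_one_cons (by omega), List.foldl_cons]
      simp only [show ¬ ((1 : Int) < 1) by omega, if_false]
      rw [show (1 : Int) + 1 = 2 from rfl,
        show (N : Int) + 1 = 2 + ((N - 1 : Nat) : Int) by omega,
        pvFoldB g 2 le_rfl (N - 1) r0 [r0]]
      refine congrArg₂ _ rfl ?_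
      have := pv_reverse_range_succ_map (fun k => (pvStepB g)^[k] r0) (N - 1)
      rw [show N - 1 + 1 = N by omega] at this
      rw [this]
      simp
    rw [hsyn, hfold]
    simp only
    -- the two transposes agree on rows of uniform length
    have hlen : ∀ s ∈ (List.range N).reverse.map (fun k => (pvStepB g)^[k] r0),
        s.length = g.length - 1 := by
      intro s hs
      rw [List.mem_map] at hs
      obtain ⟨k, _, rfl⟩ := hs
      exact pv_iter_length g hg k
    have hne : (List.range N).reverse.map (fun k => (pvStepB g)^[k] r0) ≠ [] := by
      intro h
      have := congrArg List.length h
      simp at this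
      omega
    obtain ⟨s0, tail, hS⟩ :
        ∃ s0 tail, (List.range N).reverse.map (fun k => (pvStepB g)^[k] r0) = s0 :: tail := by
      cases hE : (List.range N).reverse.map (fun k => (pvStepB g)^[k] r0) with
      | nil => exact absurd hE hne
      | cons a b => exact ⟨a, b, rfl⟩
    rw [hS]
    have hs0 : s0.length = g.length - 1 := by
      have hmem : s0 ∈ s0 :: tail := List.mem_cons_self
      rw [← hS] at hmem
      exact hlen s0 hmem
    refine congrArg₂ Prod.mk ?_ rfl
    show pvZipStar (s0 :: tail)
      = (PySem.List.pyRange 0 ((s0.length : Nat) : Int) 1).map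
          (fun j => (s0 :: tail).map (fun s => PySem.List.pyGetD s j 0))
    rw [hs0, pvZipStar_uniform (g.length - 1) (s0 :: tail) (by simp) (by rw [← hS]; exact hlen)]
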